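-- pv_equiv track=rewrite | github.com/sargalias/touch-typing-trainer-with-custom-text | typing.py | calculateChars
-- ===== SOURCE A (Python) =====
-- def subtractChar(correctChars, wrongChars, num):
--     if wrongChars >= num:
--         wrongChars -= num
--         num = 0
--     else:
--         num -= wrongChars
--         wrongChars = 0
--     if correctChars >= num:
--         correctChars -= num
--     else:
--         correctChars = 0
--     return correctChars, wrongChars
--
-- def addChar(correctChars, wrongChars, num):
--     if wrongChars > 0:
--         wrongChars += num
--     else:
--         correctChars += num
--     return correctChars, wrongChars
--
-- def skipLine(linesList, lineLengths, correctChars, wrongChars):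
--     index = 0
--     totalChars = correctChars + wrongChars
--     for length in lineLengths:
--         if totalChars >= length:
--             index += 1
--         else:
--             break
--
--     assert index < len(lineLengths)
--     correctChars = lineLengths[index]
--     wrongChars = 0
--     return correctChars, wrongChars
--
-- def backLine(linesList, lineLengths, correctChars, wrongChars):
--     index = 0
--     totalChars = correctChars + wrongChars
--     for length in lineLengths:
--         if totalChars > length:
--             index += 1
--         else:
--             break
--
--     if index > 0:
--         correctChars, wrongChars = subtractChar(correctChars, wrongChars, totalChars - lineLengths[index-1])
--     else:                   # we are on the first line
--         correctChars = 0
--         wrongChars = 0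
--     return correctChars, wrongChars
--
-- def calculateChars(linesList, lines, correctChars, wrongChars, pressed, lineLengths):
--     for char in pressed:
--         currentLine = 0
--         try:
--             currentChar = lines[correctChars + wrongChars]
--         except IndexError:
--             wrongChars -= 1
--             return correctChars, wrongChars
--
--         if char == "plus":
--             correctChars, wrongChars = addChar(correctChars, wrongChars, 1)
--         elif char == "minus" or char == "\b":
--             correctChars, wrongChars = subtractChar(correctChars, wrongChars, 1)
--
--
--         elif char == "line+":
--             correctChars, wrongChars = skipLine(linesList, lineLengths, correctChars, wrongChars)
--         elif char == "line-":
--             correctChars, wrongChars = backLine(linesList, lineLengths, correctChars, wrongChars)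
--
--
--
--
--         elif (char == "\n" or char == " ") and (currentChar == "\n" or currentChar == " "):
--             correctChars, wrongChars = addChar(correctChars, wrongChars, 1)
--         elif char == '#':
--             correctChars, wrongChars, = addChar(correctChars, wrongChars, 1)
--         else:
--             if char != currentChar:
--                 wrongChars += 1
--             else:
--                 correctChars,wrongChars = addChar(correctChars, wrongChars, 1)
--     return correctChars, wrongChars
-- ===== SOURCE B (Python) =====
-- def _advance(c, w):
--     return (c, w + 1) if w > 0 else (c + 1, w)
--
-- def _rewind(c, w, num):
--     return max(c - max(num - w, 0), 0), max(w - num, 0)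
--
-- def _firstAbove(pm, t, strict):
--     # binary search on the monotone prefix-maximum array: first index whose
--     # prefix maximum exceeds t (strictly, or >= t when strict is False)
--     lo, hi = 0, len(pm)
--     while lo < hi:
--         mid = (lo + hi) // 2
--         if (t < pm[mid]) if strict else (t <= pm[mid]):
--             hi = mid
--         else:
--             lo = mid + 1
--     return lo
--
-- def calculateChars(linesList, lines, correctChars, wrongChars, pressed, lineLengths):
--     # prefix maxima: the first element of lineLengths exceeding a threshold is the
--     # first element of this monotone array exceeding it, so it can be bisected
--     pm = []
--     m = None
--     for l in lineLengths:
--         m = l if (m is None or l > m) else m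
--         pm.append(m)
--     c, w = correctChars, wrongChars
--     n = len(lines)
--     for key in pressed:
--         pos = c + w
--         if not (-n <= pos < n):
--             return c, w - 1
--         cur = lines[pos]
--         if key in ("plus", "#"):
--             c, w = _advance(c, w)
--         elif key in ("minus", "\b"):
--             c, w = _rewind(c, w, 1)
--         elif key == "line+":
--             i = _firstAbove(pm, pos, True)
--             assert i < len(lineLengths)
--             c, w = lineLengths[i], 0
--         elif key == "line-":
--             i = _firstAbove(pm, pos, False)
--             if i == 0:
--                 c, w = 0, 0
--             else:
--                 c, w = _rewind(c, w, pos - lineLengths[i - 1])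
--         elif key == cur or (key in ("\n", " ") and cur in ("\n", " ")):
--             c, w = _advance(c, w)
--         else:
--             w += 1
--     return c, w
-- ===== Notes on version B (the rewrite author's own statement) =====
-- stated objective: alternative
-- what changed: B precomputes the running prefix-maximum array of lineLengths once and binary-searches it for the line+/line- target index (correct even on unsorted lists, since the first element exceeding a threshold equals the first prefix-maximum exceeding it), replacing A's per-keystroke linear scans; the counter helpers become closed-form clamped max-arithmetic and the try/except an explicit bounds check.
-- outside the precondition, e.g. on calculateChars(['x'], 'abc', 5, 0, ['line+'], [1]): A returns (5, -1), B returns (5, -1)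
import Mathlib
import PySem

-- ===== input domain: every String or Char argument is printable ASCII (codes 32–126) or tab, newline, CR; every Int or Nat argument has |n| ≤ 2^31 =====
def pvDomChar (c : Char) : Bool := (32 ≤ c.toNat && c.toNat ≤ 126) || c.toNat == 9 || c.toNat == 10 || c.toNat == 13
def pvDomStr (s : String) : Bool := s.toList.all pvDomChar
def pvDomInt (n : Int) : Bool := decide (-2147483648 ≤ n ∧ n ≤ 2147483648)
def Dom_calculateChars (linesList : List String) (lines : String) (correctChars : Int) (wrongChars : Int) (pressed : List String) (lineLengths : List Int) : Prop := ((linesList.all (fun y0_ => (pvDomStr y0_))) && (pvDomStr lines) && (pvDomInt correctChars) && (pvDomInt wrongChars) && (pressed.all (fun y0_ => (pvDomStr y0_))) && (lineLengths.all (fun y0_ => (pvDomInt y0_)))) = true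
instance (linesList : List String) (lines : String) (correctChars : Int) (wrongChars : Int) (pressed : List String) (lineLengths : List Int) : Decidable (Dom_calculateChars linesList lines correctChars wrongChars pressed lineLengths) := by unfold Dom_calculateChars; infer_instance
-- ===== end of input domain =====

-- B replaces A's per-keystroke linear scans over lineLengths by one precomputed prefix-maximum array that is
-- binary-searched (correct on arbitrary, even unsorted, lineLengths), and uses closed-form clamped counter
-- updates instead of A's helper branch chains; objective: alternative (no speed claim).

-- ===== PORT A =====
-- literal port of subtractChar
def pvSubtractChar (correctChars wrongChars num : Int) : Int × Int :=
  let p := if wrongChars ≥ num then (wrongChars - num, (0 : Int)) else ((0 : Int), num - wrongChars)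
  let wrongChars := p.1
  let num := p.2
  let correctChars := if correctChars ≥ num then correctChars - num else (0 : Int)
  (correctChars, wrongChars)

-- literal port of addChar
def pvAddChar (correctChars wrongChars num : Int) : Int × Int :=
  if wrongChars > 0 then (correctChars, wrongChars + num) else (correctChars + num, wrongChars)

-- skipLine's counting loop: `for length in lineLengths: if totalChars >= length: index += 1 else break`
def pvSkipIdx (totalChars : Int) : List Int → Nat
  | [] => 0
  | length :: rest => if totalChars ≥ length then pvSkipIdx totalChars rest + 1 else 0

-- literal port of skipLine; where Python's `assert index < len(lineLengths)` fails A raises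
-- (excluded by Pre_), the port returns the junk value (0, 0) there (getD's default)
def pvSkipLine (linesList : List String) (lineLengths : List Int) (correctChars wrongChars : Int) : Int × Int :=
  let totalChars := correctChars + wrongChars
  let index := pvSkipIdx totalChars lineLengths
  (lineLengths.getD index 0, 0)

-- backLine's counting loop: `if totalChars > length: index += 1 else break`
def pvBackIdx (totalChars : Int) : List Int → Nat
  | [] => 0
  | length :: rest => if totalChars > length then pvBackIdx totalChars rest + 1 else 0

-- literal port of backLine (index > 0 keeps lineLengths[index-1] in range, getD never defaults inside Pre_)
def pvBackLine (linesList : List String) (lineLengths : List Int) (correctChars wrongChars : Int) : Int × Int :=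
  let totalChars := correctChars + wrongChars
  let index := pvBackIdx totalChars lineLengths
  if index > 0 then pvSubtractChar correctChars wrongChars (totalChars - lineLengths.getD (index - 1) 0)
  else (0, 0)

-- the body of A's `for char in pressed` loop after `currentChar = lines[...]` succeeded
def pvStepA (linesList : List String) (lineLengths : List Int) (correctChars wrongChars : Int) (char : String) (currentChar : Char) : Int × Int :=
  if char = "plus" then pvAddChar correctChars wrongChars 1
  else if char = "minus" ∨ char = "\x08" then pvSubtractChar correctChars wrongChars 1
  else if char = "line+" then pvSkipLine linesList lineLengths correctChars wrongChars
  else if char = "line-" then pvBackLine linesList lineLengths correctChars wrongChars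
  else if (char = "\n" ∨ char = " ") ∧ (currentChar = '\n' ∨ currentChar = ' ') then pvAddChar correctChars wrongChars 1
  else if char = "#" then pvAddChar correctChars wrongChars 1
  else if char ≠ String.ofList [currentChar] then (correctChars, wrongChars + 1)
  else pvAddChar correctChars wrongChars 1

def calculateChars (linesList : List String) (lines : String) (correctChars : Int) (wrongChars : Int) (pressed : List String) (lineLengths : List Int) : Int × Int :=
  match pressed with
  | [] => (correctChars, wrongChars)
  | char :: rest =>
    match PySem.Str.pyGet? lines (correctChars + wrongChars) with
    | none => (correctChars, wrongChars - 1)      -- except IndexError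
    | some currentChar =>
      let p := pvStepA linesList lineLengths correctChars wrongChars char currentChar
      calculateChars linesList lines p.1 p.2 rest lineLengths

-- ===== PORT B =====
-- Source B's _advance
def pvAdvance (c w : Int) : Int × Int := if w > 0 then (c, w + 1) else (c + 1, w)

-- Source B's _rewind
def pvRewind (c w num : Int) : Int × Int := (max (c - max (num - w) 0) 0, max (w - num) 0)

-- the comparison `(t < pm[mid]) if strict else (t <= pm[mid])`
def pvCond (strict : Bool) (t v : Int) : Bool := if strict then t < v else t ≤ v

-- Source B's _firstAbove: binary search on the monotone prefix-maximum array
def pvBisect (pm : List Int) (t : Int) (strict : Bool) (lo hi : Nat) : Nat :=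
  if h : lo < hi then
    let mid := (lo + hi) / 2
    if pvCond strict t (pm.getD mid 0) then pvBisect pm t strict lo mid
    else pvBisect pm t strict (mid + 1) hi
  else lo
termination_by hi - lo
decreasing_by all_goals omega

-- the prefix-maximum loop of Source B (pvPMgo is its tail after the first element fixes m)
def pvPMgo (m : Int) : List Int → List Int
  | [] => []
  | l :: ls => let m' := if l > m then l else m; m' :: pvPMgo m' ls

def pvPrefMax : List Int → List Int
  | [] => []
  | l :: ls => l :: pvPMgo l ls

-- one keystroke of Source B's loop, after the bounds check passed
def pvStepB (lineLengths pm : List Int) (c w : Int) (key : String) (cur : Char) : Int × Int :=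
  if key = "plus" ∨ key = "#" then pvAdvance c w
  else if key = "minus" ∨ key = "\x08" then pvRewind c w 1
  else if key = "line+" then
    let i := pvBisect pm (c + w) true 0 pm.length
    match lineLengths[i]? with
    | some v => (v, 0)
    | none => (c, w)      -- Source B's assert fires here (outside Pre_): junk value
  else if key = "line-" then
    let i := pvBisect pm (c + w) false 0 pm.length
    if i = 0 then (0, 0)
    else pvRewind c w (c + w - lineLengths.getD (i - 1) 0)
  else if key = String.ofList [cur] ∨ ((key = "\n" ∨ key = " ") ∧ (cur = '\n' ∨ cur = ' ')) then pvAdvance c w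
  else (c, w + 1)

-- Source B's `for key in pressed` loop (pm precomputed once)
def pvLoopB (linesList : List String) (lines : String) (lineLengths pm : List Int) (c w : Int) : List String → Int × Int
  | [] => (c, w)
  | key :: rest =>
    let n : Int := (lines.toList.length : Int)
    let pos := c + w
    if ¬ (-n ≤ pos ∧ pos < n) then (c, w - 1)
    else
      let cur := (PySem.Str.pyGet? lines pos).getD ' '    -- in range by the check above, never defaults
      let p := pvStepB lineLengths pm c w key cur
      pvLoopB linesList lines lineLengths pm p.1 p.2 rest

def calculateChars_alt (linesList : List String) (lines : String) (correctChars : Int) (wrongChars : Int) (pressed : List String) (lineLengths : List Int) : Int × Int :=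
  pvLoopB linesList lines lineLengths (pvPrefMax lineLengths) correctChars wrongChars pressed

-- ===== PRECONDITION & SPEC =====
-- Pre_ excludes inputs whose `pressed` contains "line+" unless some entry of lineLengths reaches the full text
-- length: only then can skipLine's `assert index < len(lineLengths)` fail (an AssertionError in A and in B alike);
-- the exact raise set depends on the whole keystroke run, so this natural closed-form sufficient condition is used,
-- and it also excludes some runs on which both programs return (the same value).
def Pre_calculateChars (linesList : List String) (lines : String) (correctChars : Int) (wrongChars : Int) (pressed : List String) (lineLengths : List Int) : Prop :=
  "line+" ∈ pressed → ∃ l ∈ lineLengths, (lines.toList.length : Int) ≤ l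
instance (linesList : List String) (lines : String) (correctChars : Int) (wrongChars : Int) (pressed : List String) (lineLengths : List Int) : Decidable (Pre_calculateChars linesList lines correctChars wrongChars pressed lineLengths) := by unfold Pre_calculateChars; infer_instance

def pvWitness_calculateChars : List String × String × Int × Int × List String × List Int :=
  (["ab", "cd"], "ab\ncd", 0, 0, ["plus", "a", "line+", "minus"], [3, 5])

def Spec_calculateChars (linesList : List String) (lines : String) (correctChars : Int) (wrongChars : Int) (pressed : List String) (lineLengths : List Int) (out : Int × Int) : Prop := out = calculateChars_alt linesList lines correctChars wrongChars pressed lineLengths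
instance (linesList : List String) (lines : String) (correctChars : Int) (wrongChars : Int) (pressed : List String) (lineLengths : List Int) (out : Int × Int) : Decidable (Spec_calculateChars linesList lines correctChars wrongChars pressed lineLengths out) := by unfold Spec_calculateChars; infer_instance

-- ===== CLAIM (what is proved, stated in full; the proofs are below) =====
def Claim_equal_calculateChars : Prop := ∀ (linesList : List String) (lines : String) (correctChars : Int) (wrongChars : Int) (pressed : List String) (lineLengths : List Int), Dom_calculateChars linesList lines correctChars wrongChars pressed lineLengths → Pre_calculateChars linesList lines correctChars wrongChars pressed lineLengths → Spec_calculateChars linesList lines correctChars wrongChars pressed lineLengths (calculateChars linesList lines correctChars wrongChars pressed lineLengths)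

-- ===== LEMMAS AND PROOFS =====

-- first index of the list satisfying p (or the length): the value both of A's counting loops compute
def pvFidx (p : Int → Bool) : List Int → Nat
  | [] => 0
  | x :: xs => if p x then 0 else pvFidx p xs + 1

lemma pvSkipIdx_eq_Fidx (t : Int) (L : List Int) : pvSkipIdx t L = pvFidx (fun v => decide (t < v)) L := by
  induction L with
  | nil => rfl
  | cons l ls ih =>
    by_cases h : t ≥ l
    · have : ¬ t < l := by omega
      simp [pvSkipIdx, pvFidx, h, this, ih]
    · have : t < l := by omega
      simp [pvSkipIdx, pvFidx, h, this]

lemma pvBackIdx_eq_Fidx (t : Int) (L : List Int) : pvBackIdx t L = pvFidx (fun v => decide (t ≤ v)) L := by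
  induction L with
  | nil => rfl
  | cons l ls ih =>
    by_cases h : t > l
    · have : ¬ t ≤ l := by omega
      simp [pvBackIdx, pvFidx, h, this, ih]
    · have : t ≤ l := by omega
      simp [pvBackIdx, pvFidx, h, this]

lemma pvFidx_le (p : Int → Bool) (xs : List Int) : pvFidx p xs ≤ xs.length := by
  induction xs with
  | nil => simp [pvFidx]
  | cons x xs ih => by_cases h : p x <;> simp [pvFidx, h] <;> omega

lemma pvFidx_before (p : Int → Bool) (xs : List Int) : ∀ i, i < pvFidx p xs → p (xs.getD i 0) = false := by
  induction xs with
  | nil => intro i h; simp [pvFidx] at h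
  | cons x xs ih =>
    intro i h
    rcases hx : p x with _ | _
    · cases i with
      | zero => simpa using hx
      | succ i =>
        simp only [pvFidx, hx, Bool.false_eq_true, if_false] at h
        simpa using ih i (by omega)
    · simp [pvFidx, hx] at h

lemma pvFidx_self (p : Int → Bool) (xs : List Int) (h : pvFidx p xs < xs.length) :
    p (xs.getD (pvFidx p xs) 0) = true := by
  induction xs with
  | nil => simp at h
  | cons x xs ih =>
    rcases hx : p x with _ | _
    · simp only [pvFidx, hx, Bool.false_eq_true, if_false, List.length_cons] at h ⊢
      simpa using ih (by omega)
    · simpa [pvFidx, hx] using hx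

-- every element of pvPMgo m ls is ≥ m
lemma pvPMgo_ge (ls : List Int) : ∀ (m : Int) (i : Nat), i < (pvPMgo m ls).length →
    m ≤ (pvPMgo m ls).getD i 0 := by
  induction ls with
  | nil => intro m i h; simp [pvPMgo] at h
  | cons l ls ih =>
    intro m i h
    simp only [pvPMgo] at h ⊢
    cases i with
    | zero => simp; split <;> omega
    | succ i =>
      simp only [List.getD_cons_succ]
      have h1 : m ≤ (if l > m then l else m) := by split <;> omega
      have h2 := ih (if l > m then l else m) i (by simpa using Nat.lt_of_succ_lt_succ h)
      omega

lemma pvPMgo_mono (ls : List Int) : ∀ (m : Int) (i j : Nat), i ≤ j → j < (pvPMgo m ls).length →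
    (pvPMgo m ls).getD i 0 ≤ (pvPMgo m ls).getD j 0 := by
  induction ls with
  | nil => intro m i j _ h; simp [pvPMgo] at h
  | cons l ls ih =>
    intro m i j hij hj
    simp only [pvPMgo] at hj ⊢
    cases j with
    | zero => interval_cases i; simp
    | succ j =>
      have hj' : j < (pvPMgo (if l > m then l else m) ls).length := by
        simpa using Nat.lt_of_succ_lt_succ hj
      cases i with
      | zero =>
        simp only [List.getD_cons_zero, List.getD_cons_succ]
        exact pvPMgo_ge ls _ j hj'
      | succ i =>
        simp only [List.getD_cons_succ]
        exact ih _ i j (Nat.le_of_succ_le_succ hij) hj'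

lemma pvPrefMax_mono (L : List Int) (i j : Nat) (hij : i ≤ j) (hj : j < (pvPrefMax L).length) :
    (pvPrefMax L).getD i 0 ≤ (pvPrefMax L).getD j 0 := by
  cases L with
  | nil => simp [pvPrefMax] at hj
  | cons l ls =>
    simp only [pvPrefMax] at hj ⊢
    cases j with
    | zero => interval_cases i; simp
    | succ j =>
      have hj' : j < (pvPMgo l ls).length := by simpa using Nat.lt_of_succ_lt_succ hj
      cases i with
      | zero =>
        simp only [List.getD_cons_zero, List.getD_cons_succ]
        exact pvPMgo_ge ls l j hj'
      | succ i =>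
        simp only [List.getD_cons_succ]
        exact pvPMgo_mono ls l i j (Nat.le_of_succ_le_succ hij) hj'

-- a monotone predicate reaches its first true index at the same place on the list and on its prefix maxima
lemma pvFidx_pvPMgo (p : Int → Bool) (hp : ∀ a b, a ≤ b → p a = true → p b = true)
    (ls : List Int) : ∀ m, p m = false → pvFidx p (pvPMgo m ls) = pvFidx p ls := by
  induction ls with
  | nil => intro m _; rfl
  | cons l ls ih =>
    intro m hm
    simp only [pvPMgo, pvFidx]
    by_cases hgt : l > m
    · simp only [if_pos hgt]
      by_cases hl : p l
      · simp [hl]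
      · simp only [Bool.eq_false_iff.mpr hl, if_false, ih l (Bool.eq_false_iff.mpr hl)]
    · simp only [if_neg hgt]
      have hl : p l = false := by
        by_contra hc
        have := hp l m (by omega) (by simpa using hc)
        simp [this] at hm
      simp [hm, hl, ih m hm]

lemma pvFidx_pvPrefMax (p : Int → Bool) (hp : ∀ a b, a ≤ b → p a = true → p b = true)
    (L : List Int) : pvFidx p (pvPrefMax L) = pvFidx p L := by
  cases L with
  | nil => rfl
  | cons l ls =>
    simp only [pvPrefMax, pvFidx]
    by_cases hl : p l
    · simp [hl]
    · simp [hl, pvFidx_pvPMgo p hp ls l (Bool.eq_false_iff.mpr hl)]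

-- binary search on a getD-monotone list computes the first true index of a monotone predicate
lemma pvBisect_correct (pm : List Int) (t : Int) (strict : Bool)
    (hmono : ∀ i j, i ≤ j → j < pm.length → pm.getD i 0 ≤ pm.getD j 0) :
    ∀ (k lo hi : Nat), hi - lo = k → lo ≤ hi → hi ≤ pm.length →
      (∀ i, i < lo → pvCond strict t (pm.getD i 0) = false) →
      (∀ i, hi ≤ i → i < pm.length → pvCond strict t (pm.getD i 0) = true) →
      pvBisect pm t strict lo hi = pvFidx (pvCond strict t) pm := by
  have hcondmono : ∀ a b, a ≤ b → pvCond strict t a = true → pvCond strict t b = true := by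
    intro a b hab h
    cases strict <;> simp [pvCond] at h ⊢ <;> omega
  intro k
  induction k using Nat.strong_induction_on with
  | _ k ihk =>
    intro lo hi hk hle hhi inv1 inv2
    by_cases hlt : lo < hi
    · rw [pvBisect]
      simp only [dif_pos hlt]
      have hmid1 : lo ≤ (lo + hi) / 2 := by omega
      have hmid2 : (lo + hi) / 2 < hi := by omega
      by_cases hc : pvCond strict t (pm.getD ((lo + hi) / 2) 0) = true
      · simp only [hc, if_true]
        refine ihk ((lo + hi) / 2 - lo) (by omega) lo ((lo + hi) / 2) rfl (by omega) (by omega) inv1 ?_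
        intro i hi1 hi2
        exact hcondmono _ _ (hmono _ _ hi1 hi2) hc
      · simp only [Bool.eq_false_iff.mpr hc, if_false]
        refine ihk (hi - ((lo + hi) / 2 + 1)) (by omega) ((lo + hi) / 2 + 1) hi rfl (by omega) hhi ?_ inv2
        intro i hi1
        by_cases hilo : i < lo
        · exact inv1 i hilo
        · by_contra hc2
          have hc2' : pvCond strict t (pm.getD i 0) = true := by
            cases h : pvCond strict t (pm.getD i 0)
            · exact absurd h hc2
            · rfl
          exact hc (hcondmono _ _ (hmono i ((lo + hi) / 2) (by omega) (by omega)) hc2')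
    · rw [pvBisect]
      simp only [dif_neg hlt]
      have heq : lo = hi := by omega
      subst heq
      set F := pvFidx (pvCond strict t) pm with hF
      have hFle : F ≤ pm.length := pvFidx_le _ _
      have h1 : lo ≤ F := by
        by_contra hcon
        have hFlt : F < lo := by omega
        have := pvFidx_self (pvCond strict t) pm (by omega)
        rw [← hF] at this
        rw [inv1 F hFlt] at this
        exact absurd this (by simp)
      have h2 : F ≤ lo := by
        by_contra hcon
        have hlolt : lo < F := by omega
        have hlen : lo < pm.length := by omega
        have := pvFidx_before (pvCond strict t) pm lo hlolt
        rw [inv2 lo (le_refl _) hlen] at this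
        exact absurd this (by simp)
      omega

-- A's two counting loops equal B's bisect on the prefix maxima
lemma skip_bisect (t : Int) (L : List Int) :
    pvBisect (pvPrefMax L) t true 0 (pvPrefMax L).length = pvSkipIdx t L := by
  rw [pvBisect_correct (pvPrefMax L) t true (pvPrefMax_mono L) ((pvPrefMax L).length - 0) 0
      (pvPrefMax L).length rfl (by omega) (le_refl _) (by intro i h; omega) (by intro i h1 h2; omega)]
  rw [pvSkipIdx_eq_Fidx]
  have : pvCond true t = fun v => decide (t < v) := by funext v; rfl
  rw [this]
  exact pvFidx_pvPrefMax _ (by intro a b hab h; simp at h ⊢; omega) L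

lemma back_bisect (t : Int) (L : List Int) :
    pvBisect (pvPrefMax L) t false 0 (pvPrefMax L).length = pvBackIdx t L := by
  rw [pvBisect_correct (pvPrefMax L) t false (pvPrefMax_mono L) ((pvPrefMax L).length - 0) 0
      (pvPrefMax L).length rfl (by omega) (le_refl _) (by intro i h; omega) (by intro i h1 h2; omega)]
  rw [pvBackIdx_eq_Fidx]
  have : pvCond false t = fun v => decide (t ≤ v) := by funext v; rfl
  rw [this]
  exact pvFidx_pvPrefMax _ (by intro a b hab h; simp at h ⊢; omega) L

lemma pvSkipIdx_lt {t : Int} {L : List Int} (h : ∃ l ∈ L, t < l) : pvSkipIdx t L < L.length := by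
  induction L with
  | nil => simp at h
  | cons l ls ih =>
    by_cases hl : t ≥ l
    · obtain ⟨x, hx, hxt⟩ := h
      rcases List.mem_cons.mp hx with hx | hx
      · subst hx; exact absurd hxt (not_lt.mpr hl)
      · have := ih ⟨x, hx, hxt⟩
        simp only [pvSkipIdx, if_pos hl, List.length_cons]
        omega
    · simp [pvSkipIdx, hl]

-- subtractChar is Source B's clamped closed form _rewind, for every num
lemma pvSubtractChar_closed (c w n : Int) : pvSubtractChar c w n = pvRewind c w n := by
  simp only [pvSubtractChar, pvRewind, Prod.mk.injEq]
  split_ifs <;> (try constructor) <;> omega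

-- one keystroke agrees, provided a big enough line length exists when the key is "line+"
lemma step_eq (linesList : List String) (lineLengths : List Int) (c w : Int) (char : String) (cur : Char)
    (hline : char = "line+" → ∃ l ∈ lineLengths, c + w < l) :
    pvStepA linesList lineLengths c w char cur = pvStepB lineLengths (pvPrefMax lineLengths) c w char cur := by
  unfold pvStepA pvStepB pvAdvance pvAddChar
  by_cases h1 : char = "plus"
  · subst h1; simp
  by_cases h2m : char = "minus"
  · subst h2m; simp [pvSubtractChar_closed]
  by_cases h2b : char = "\x08"
  · subst h2b; simp [pvSubtractChar_closed]
  by_cases h3 : char = "line+"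
  · subst h3
    have hidx : pvSkipIdx (c + w) lineLengths < lineLengths.length := pvSkipIdx_lt (hline rfl)
    simp only [pvSkipLine]
    rw [skip_bisect]
    simp [List.getD_eq_getElem?_getD, List.getElem?_eq_getElem hidx]
  by_cases h4 : char = "line-"
  · subst h4
    simp only [pvBackLine]
    rw [back_bisect]
    rcases Nat.eq_zero_or_pos (pvBackIdx (c + w) lineLengths) with h0 | h0
    · simp [h0]
    · have h0' : pvBackIdx (c + w) lineLengths ≠ 0 := by omega
      simp [h0, h0', pvSubtractChar_closed]
  by_cases h6 : char = "#"
  · subst h6; simp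
  by_cases h5 : (char = "\n" ∨ char = " ") ∧ (cur = '\n' ∨ cur = ' ')
  · simp [h1, h2m, h2b, h3, h4, h5, h6]
  by_cases h7 : char = String.ofList [cur]
  · have h7' : (char = String.ofList [cur]) = True := eq_true h7
    simp [h1, h2m, h2b, h3, h4, h5, h6, h7']
  · simp [h1, h2m, h2b, h3, h4, h5, h6, h7]

-- the main induction over pressed
lemma calc_eq (linesList : List String) (lines : String) (lineLengths : List Int) :
    ∀ (pressed : List String) (c w : Int),
      ("line+" ∈ pressed → ∃ l ∈ lineLengths, (lines.toList.length : Int) ≤ l) →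
      calculateChars linesList lines c w pressed lineLengths
        = pvLoopB linesList lines lineLengths (pvPrefMax lineLengths) c w pressed := by
  intro pressed
  induction pressed with
  | nil => intro c w _; rfl
  | cons key rest ih =>
    intro c w hpre
    unfold calculateChars pvLoopB
    by_cases hr : PySem.Raise.InRange lines.toList.length (c + w)
    · obtain ⟨cur, hcur⟩ : ∃ cur, PySem.Str.pyGet? lines (c + w) = some cur := by
        rcases h : PySem.Str.pyGet? lines (c + w) with _ | cur
        · exfalso
          have := (PySem.List.pyGet?_eq_none_iff lines.toList (c + w)).mp (by simpa using h)
          exact this hr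
        · exact ⟨cur, rfl⟩
      have hnb : ¬ ¬ (-(lines.toList.length : Int) ≤ c + w ∧ c + w < (lines.toList.length : Int)) := by
        intro hcon
        exact hcon ⟨hr.1, hr.2⟩
      rw [hcur]
      simp only [hnb, ite_false, hcur, Option.getD_some]
      have hstep : pvStepA linesList lineLengths c w key cur
          = pvStepB lineLengths (pvPrefMax lineLengths) c w key cur := by
        apply step_eq
        intro hk
        obtain ⟨l, hl, hlen⟩ := hpre (by simp [hk])
        refine ⟨l, hl, ?_⟩
        have h2 := hr.2
        omega
      rw [hstep]
      exact ih _ _ (fun hm => hpre (List.mem_cons_of_mem _ hm))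
    · have hnone : PySem.Str.pyGet? lines (c + w) = none := by
        have := (PySem.List.pyGet?_eq_none_iff lines.toList (c + w)).mpr hr
        simpa using this
      rw [hnone]
      dsimp only
      split_ifs with h
      · exfalso
        exact hr ⟨h.1, h.2⟩
      · rfl

-- ===== VERDICT (by name: the statement is the Claim_ definition above) =====
theorem calculateChars_spec : Claim_equal_calculateChars := by
  intro linesList lines c w pressed lineLengths _ hpre
  unfold Spec_calculateChars calculateChars_alt
  exact calc_eq linesList lines lineLengths pressed c w hpre
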